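-- pv_equiv track=rewrite | github.com/ischeinfeld/py_nlp | src_deprecated/parameters.py | uv_counts
-- ===== SOURCE A (Python) =====
-- import copy
--
-- def uv_counts(input_sentences):
-- 	""" Sum c(u,v) """
--
-- 	sentences = copy.deepcopy(input_sentences)
--
-- 	for sentence_tags in sentences:
-- 		sentence_tags[1].insert(0, "<START>") # Add buffer tags before tag sequence
-- 		sentence_tags[1].insert(0, "<START>")
-- 		sentence_tags[1].append("<STOP>") # Add stop symbol, Note, in uv_counts kept only for indexing
--
--
-- 	q = {}
--
-- 	for i in range(len(sentences)):
-- 		for j in range(2, len(sentences[i][1])): # [1] is for tags, not same # words and tags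
--
-- 			u = sentences[i][1][j-2]
-- 			v = sentences[i][1][j-1]
--
-- 			if not u in q:
-- 				q[u] = {}
-- 			if not v in q[u]:
-- 				q[u][v] = 0
--
-- 			q[u][v] += 1
-- 	return q
-- ===== SOURCE B (Python) =====
-- def uv_counts(input_sentences):
-- 	""" Sum c(u,v) -- rewritten: flatten all padded-tag bigrams into one list,
-- 	count them in a second pass, reshape the counts into the nested dict in a
-- 	third pass; the input is never mutated (A deep-copies instead). """
--
-- 	pairs = []
-- 	for sentence in input_sentences:
-- 		stream = ["<START>", "<START>"] + sentence[1]
-- 		pairs += list(zip(stream, stream[1:]))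
--
-- 	counts = {}
-- 	for p in pairs:
-- 		counts[p] = counts.get(p, 0) + 1
--
-- 	q = {}
-- 	for (u, v), c in counts.items():
-- 		q.setdefault(u, {})[v] = c
-- 	return q
-- ===== Notes on version B (the rewrite author's own statement) =====
-- stated objective: alternative
-- what changed: Instead of deep-copying and mutating the sentences and updating a nested dict inside one doubly-indexed loop, B collects all padded-tag bigrams into one flat list, counts them in a second pass with a plain dict, and reshapes the counts into the nested dict in a third pass, never mutating the input.
import Mathlib
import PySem

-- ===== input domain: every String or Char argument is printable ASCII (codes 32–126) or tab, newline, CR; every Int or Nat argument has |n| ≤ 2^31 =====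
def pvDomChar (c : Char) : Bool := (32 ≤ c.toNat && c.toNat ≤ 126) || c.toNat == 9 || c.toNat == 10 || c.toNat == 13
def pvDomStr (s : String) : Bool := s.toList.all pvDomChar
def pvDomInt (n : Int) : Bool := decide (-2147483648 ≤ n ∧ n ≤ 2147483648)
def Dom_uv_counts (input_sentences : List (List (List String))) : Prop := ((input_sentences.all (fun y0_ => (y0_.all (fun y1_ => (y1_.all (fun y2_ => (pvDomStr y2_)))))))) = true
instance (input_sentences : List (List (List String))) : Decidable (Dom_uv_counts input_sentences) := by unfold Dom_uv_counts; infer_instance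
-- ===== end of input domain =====

-- B re-implements A in three passes (flatten bigrams / count / reshape) without mutating the
-- input; equivalence of the RETURN values is proved (A only mutates its own deepcopy).

-- ===== PORT A =====
-- Literal port of A: copy.deepcopy then in-place padding of sentence_tags[1] becomes List.set
-- at index 1; indexing is PySem.List.pyGetD (in range on every input admitted by Pre_).
def uv_counts (input_sentences : List (List (List String))) : List (String × List (String × Int)) :=
  let sentences := input_sentences.map (fun sentence_tags =>
    sentence_tags.set 1 (("<START>" :: ("<START>" :: PySem.List.pyGetD sentence_tags 1 [])) ++ ["<STOP>"]))
  let q : PySem.Dict String (PySem.Dict String Int) :=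
    (PySem.List.pyRange 0 (sentences.length : Int) 1).foldl (fun q i =>
      let tags := PySem.List.pyGetD (PySem.List.pyGetD sentences i []) 1 []
      (PySem.List.pyRange 2 ((tags.length : Int)) 1).foldl (fun q j =>
        let u := PySem.List.pyGetD tags (j - 2) ""
        let v := PySem.List.pyGetD tags (j - 1) ""
        let q := if q.contains u then q else q.insert u PySem.Dict.empty
        let q := if (q.getD u PySem.Dict.empty).contains v then q
                 else q.insert u ((q.getD u PySem.Dict.empty).insert v 0)
        q.insert u ((q.getD u PySem.Dict.empty).modify v 0 (· + 1))) q)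
      PySem.Dict.empty
  q.items.map (fun p => (p.1, p.2.items))

-- ===== PORT B =====
-- Literal port of Source B: pass 1 flattens all padded bigrams, pass 2 counts them in a flat
-- dict, pass 3 reshapes the counts into the nested dict.
def uv_counts_alt (input_sentences : List (List (List String))) : List (String × List (String × Int)) :=
  let pairs : List (String × String) := input_sentences.foldl (fun pairs sentence =>
    let stream := ["<START>", "<START>"] ++ PySem.List.pyGetD sentence 1 []
    pairs ++ stream.zip (PySem.List.slice stream (some 1) none)) []
  let counts : PySem.Dict (String × String) Int :=
    pairs.foldl (fun counts p => counts.insert p (counts.getD p 0 + 1)) PySem.Dict.empty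
  let q : PySem.Dict String (PySem.Dict String Int) :=
    counts.items.foldl (fun q pc =>
      let q1 := q.setdefault pc.1.1 PySem.Dict.empty
      q1.insert pc.1.1 ((q1.getD pc.1.1 PySem.Dict.empty).insert pc.1.2 pc.2)) PySem.Dict.empty
  q.items.map (fun p => (p.1, p.2.items))

-- ===== PRECONDITION & SPEC =====
-- Pre_ excludes exactly the inputs where the Python A raises IndexError: a sentence with
-- fewer than two components has no sentence_tags[1] (B raises on the same inputs).
def Pre_uv_counts (input_sentences : List (List (List String))) : Prop :=
  ∀ s ∈ input_sentences, 2 ≤ s.length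
instance (input_sentences : List (List (List String))) : Decidable (Pre_uv_counts input_sentences) := by
  unfold Pre_uv_counts; infer_instance

def pvWitness_uv_counts : List (List (List String)) := [[["w1", "w2"], ["N", "V"]]]

def Spec_uv_counts (input_sentences : List (List (List String))) (out : List (String × List (String × Int))) : Prop := out = uv_counts_alt input_sentences
instance (input_sentences : List (List (List String))) (out : List (String × List (String × Int))) : Decidable (Spec_uv_counts input_sentences out) := by unfold Spec_uv_counts; infer_instance

-- ===== CLAIM (what is proved, stated in full; the proofs are below) =====
def Claim_equal_uv_counts : Prop := ∀ (input_sentences : List (List (List String))), Dom_uv_counts input_sentences → Pre_uv_counts input_sentences → Spec_uv_counts input_sentences (uv_counts input_sentences)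

-- ===== LEMMAS AND PROOFS =====

-- the net effect of one execution of A's loop body on the nested dict
def pvStep (q : PySem.Dict String (PySem.Dict String Int)) (p : String × String) :
    PySem.Dict String (PySem.Dict String Int) :=
  q.insert p.1 ((q.getD p.1 PySem.Dict.empty).insert p.2
    ((q.getD p.1 PySem.Dict.empty).getD p.2 0 + 1))

-- the net effect of one execution of B's reshape body
def pvG (q : PySem.Dict String (PySem.Dict String Int)) (pc : (String × String) × Int) :
    PySem.Dict String (PySem.Dict String Int) :=
  q.insert pc.1.1 ((q.getD pc.1.1 PySem.Dict.empty).insert pc.1.2 pc.2)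

-- the bigrams of one padded tag stream (the trailing "<STOP>" is never read)
def pvPairs (tags : List String) : List (String × String) :=
  ("<START>" :: ("<START>" :: tags)).zip ("<START>" :: tags)

def pvAll (input_sentences : List (List (List String))) : List (String × String) :=
  input_sentences.flatMap (fun s => pvPairs (PySem.List.pyGetD s 1 []))

def pvCnt (ps : List (String × String)) (k : String × String) : Int := (ps.count k : Int)

def pvInner (ps : List (String × String)) (u : String) : List (String × Int) :=
  ((PySem.Set.ofList ps).filter (fun k => k.1 == u)).map (fun k => (k.2, pvCnt ps k))

-- the closed form both folds are shown to equal
def pvSpecA (ps : List (String × String)) : PySem.Dict String (PySem.Dict String Int) :=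
  PySem.Dict.mk ((PySem.Set.ofList (ps.map Prod.fst)).map
    (fun u => (u, PySem.Dict.mk (pvInner ps u))))

-- the padded sentence and A's literal loop body (defeq to the port's let-chain)
def pvPad (s : List (List String)) : List (List String) :=
  s.set 1 (("<START>" :: ("<START>" :: PySem.List.pyGetD s 1 [])) ++ ["<STOP>"])

def pvBody (q : PySem.Dict String (PySem.Dict String Int)) (u v : String) :
    PySem.Dict String (PySem.Dict String Int) :=
  let q1 := if q.contains u then q else q.insert u PySem.Dict.empty
  let q2 := if (q1.getD u PySem.Dict.empty).contains v then q1
            else q1.insert u ((q1.getD u PySem.Dict.empty).insert v 0)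
  q2.insert u ((q2.getD u PySem.Dict.empty).modify v 0 (· + 1))

lemma pv_modify_eq_insert {κ ν : Type} [BEq κ] (d : PySem.Dict κ ν) (k : κ) (d0 : ν) (f : ν → ν) :
    d.modify k d0 f = d.insert k (f (d.getD k d0)) := rfl

lemma pv_netA (q : PySem.Dict String (PySem.Dict String Int)) (u v : String) :
    (let q1 := if q.contains u then q else q.insert u PySem.Dict.empty
     let q2 := if (q1.getD u PySem.Dict.empty).contains v then q1
               else q1.insert u ((q1.getD u PySem.Dict.empty).insert v 0)
     q2.insert u ((q2.getD u PySem.Dict.empty).modify v 0 (· + 1))) = pvStep q (u, v) := by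
  by_cases hu : q.contains u = true
  · by_cases hv : (q.getD u PySem.Dict.empty).contains v = true
    · simp [pvStep, pv_modify_eq_insert, hu, hv]
    · simp [pvStep, pv_modify_eq_insert, hu, hv, PySem.Dict.getD_insert_self,
        PySem.Dict.insert_insert_self,
        PySem.Dict.getD_of_not_contains _ _ (Bool.not_eq_true _ ▸ hv)]
  · simp [pvStep, pv_modify_eq_insert, hu, PySem.Dict.getD_insert_self,
      PySem.Dict.contains_empty, PySem.Dict.getD_empty, PySem.Dict.insert_insert_self,
      PySem.Dict.getD_of_not_contains _ _ (Bool.not_eq_true _ ▸ hu)]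

lemma pv_body_eq (q : PySem.Dict String (PySem.Dict String Int)) (u v : String) :
    pvBody q u v = pvStep q (u, v) := pv_netA q u v

lemma pv_netB (q : PySem.Dict String (PySem.Dict String Int)) (pc : (String × String) × Int) :
    (let q1 := q.setdefault pc.1.1 PySem.Dict.empty
     q1.insert pc.1.1 ((q1.getD pc.1.1 PySem.Dict.empty).insert pc.1.2 pc.2)) = pvG q pc := by
  by_cases hu : q.contains pc.1.1 = true
  · simp [pvG, PySem.Dict.setdefault_of_contains _ _ hu]
  · simp [pvG, PySem.Dict.setdefault_of_not_contains _ _ (Bool.not_eq_true _ ▸ hu),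
      PySem.Dict.getD_insert_self, PySem.Dict.insert_insert_self,
      PySem.Dict.getD_of_not_contains _ _ (Bool.not_eq_true _ ▸ hu)]

-- a foldl over range(len(l)) reading l[k] is a foldl over l
lemma pv_foldl_range_getD {α σ : Type} (l : List α) (d : α) (f : σ → α → σ) (s : σ) :
    (List.range l.length).foldl (fun st k => f st (l.getD k d)) s = l.foldl f s := by
  induction l using List.reverseRecOn with
  | nil => simp
  | append_singleton l x ih =>
    have hlen : (l ++ [x]).length = l.length + 1 := by simp
    rw [hlen, List.range_succ, List.foldl_append, List.foldl_append, List.foldl_cons,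
      List.foldl_nil, List.foldl_cons, List.foldl_nil]
    have h1 : (List.range l.length).foldl (fun st k => f st ((l ++ [x]).getD k d)) s
        = (List.range l.length).foldl (fun st k => f st (l.getD k d)) s := by
      refine PySem.List.foldl_congr_mem _ _ _ _ (fun acc k hk => ?_)
      rw [List.getD_append _ _ _ _ (List.mem_range.mp hk)]
    rw [h1, ih, List.getD_append_right l [x] d l.length le_rfl]
    simp

-- a foldl over range(len p - 1) reading p[k], p[k+1] is a foldl over the bigrams of p
lemma pv_foldl_zip_getD {α σ : Type} (p : List α) (d : α) (g : σ → α → α → σ) (s : σ) :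
    (List.range (p.length - 1)).foldl (fun st k => g st (p.getD k d) (p.getD (k + 1) d)) s
      = (p.zip p.tail).foldl (fun st pr => g st pr.1 pr.2) s := by
  rw [← pv_foldl_range_getD (p.zip p.tail) (d, d) (fun st pr => g st pr.1 pr.2) s]
  have hlen : (p.zip p.tail).length = p.length - 1 := by
    simp [List.length_zip, List.length_tail]
  rw [hlen]
  refine PySem.List.foldl_congr_mem _ _ _ _ (fun acc k hk => ?_)
  have hk' : k < p.length - 1 := List.mem_range.mp hk
  have h1 : k < p.length := by omega
  have h2 : k + 1 < p.length := by omega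
  have hz : k < (p.zip p.tail).length := by omega
  rw [List.getD_eq_getElem _ _ h1, List.getD_eq_getElem _ _ h2, List.getD_eq_getElem _ _ hz,
    List.getElem_zip, List.getElem_tail]

-- A's inner index loop over a padded stream is a foldl over its bigrams
lemma pv_inner_loop (tags : List String) {σ : Type} (g : σ → String → String → σ) (s : σ) :
    (PySem.List.pyRange 2 (((("<START>" :: ("<START>" :: tags)) ++ ["<STOP>"]).length : Int)) 1).foldl
      (fun st j => g st (PySem.List.pyGetD (("<START>" :: ("<START>" :: tags)) ++ ["<STOP>"]) (j - 2) "")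
                        (PySem.List.pyGetD (("<START>" :: ("<START>" :: tags)) ++ ["<STOP>"]) (j - 1) "")) s
      = (pvPairs tags).foldl (fun st pr => g st pr.1 pr.2) s := by
  have hll : ((("<START>" :: ("<START>" :: tags)) ++ ["<STOP>"]).length : Int) = (tags.length : Int) + 3 := by
    simp; omega
  rw [hll, PySem.List.pyRange_one, List.foldl_map]
  have hcast : (((tags.length : Int) + 3) - 2).toNat = tags.length + 1 := by omega
  rw [hcast]
  have hzip := pv_foldl_zip_getD ("<START>" :: ("<START>" :: tags)) "" g s
  have hlen1 : ("<START>" :: ("<START>" :: tags)).length - 1 = tags.length + 1 := by simp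
  rw [hlen1] at hzip
  have hpp : pvPairs tags
      = (("<START>" :: ("<START>" :: tags)).zip ("<START>" :: ("<START>" :: tags)).tail) := rfl
  rw [hpp, ← hzip]
  refine PySem.List.foldl_congr_mem _ _ _ _ (fun acc k hk => ?_)
  have hk' : k < tags.length + 1 := List.mem_range.mp hk
  have e1 : (2 + (k : Int)) - 2 = ((k : Nat) : Int) := by omega
  have e2 : (2 + (k : Int)) - 1 = (((k + 1 : Nat) : Nat) : Int) := by push_cast; omega
  rw [e1, e2, PySem.List.pyGetD_natCast, PySem.List.pyGetD_natCast]
  have hp1 : k < ("<START>" :: ("<START>" :: tags)).length := by simp; omega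
  have hp2 : k + 1 < ("<START>" :: ("<START>" :: tags)).length := by simp; omega
  rw [List.getD_append _ _ _ _ hp1, List.getD_append _ _ _ _ hp2]

-- dedup commutes with mapping across it
lemma pv_ofList_map_ofList {α β : Type} [BEq α] [LawfulBEq α] [BEq β] [LawfulBEq β]
    (xs : List α) (f : α → β) :
    PySem.Set.ofList ((PySem.Set.ofList xs).map f) = PySem.Set.ofList (xs.map f) := by
  induction xs using List.reverseRecOn with
  | nil => rfl
  | append_singleton xs x ih =>
    rw [PySem.Set.ofList_append_singleton, List.map_append, List.map_cons, List.map_nil,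
      PySem.Set.ofList_append_singleton]
    by_cases hx : x ∈ PySem.Set.ofList xs
    · rw [PySem.Set.add_of_mem hx, ih]
      have hfx : f x ∈ PySem.Set.ofList (xs.map f) := by
        rw [PySem.Set.mem_ofList]
        exact List.mem_map_of_mem ((PySem.Set.mem_ofList xs x).mp hx)
      rw [PySem.Set.add_of_mem hfx]
    · rw [PySem.Set.add_of_not_mem hx, List.map_append, List.map_cons, List.map_nil,
        PySem.Set.ofList_append_singleton, ih]

-- keys of the closed form
lemma pv_keys_specA (ps : List (String × String)) :
    (pvSpecA ps).keys = PySem.Set.ofList (ps.map Prod.fst) := by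
  rw [pvSpecA, PySem.Dict.keys_mk, List.map_map]
  have h : ((fun (x : String × PySem.Dict String Int) => x.1)
      ∘ fun u => (u, PySem.Dict.mk (pvInner ps u))) = id := rfl
  rw [h, List.map_id]

lemma pv_nodup_inner_keys (ps : List (String × String)) (u : String) :
    (PySem.Dict.mk (pvInner ps u)).keys.Nodup := by
  rw [PySem.Dict.keys_mk]
  unfold pvInner
  rw [List.map_map]
  refine List.Nodup.map_on ?_ ((PySem.Set.nodup_ofList ps).filter _)
  intro a ha b hb hab
  have ha' := (List.mem_filter.mp ha).2
  have hb' := (List.mem_filter.mp hb).2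
  have h1 : a.1 = u := by simpa using ha'
  have h2 : b.1 = u := by simpa using hb'
  have h3 : a.2 = b.2 := by simpa using hab
  exact Prod.ext (h1.trans h2.symm) h3

-- the inner-dict lookup of the closed form
lemma pv_getD_specA {ps : List (String × String)} {u : String}
    (hu : u ∈ PySem.Set.ofList (ps.map Prod.fst)) :
    (pvSpecA ps).getD u PySem.Dict.empty = PySem.Dict.mk (pvInner ps u) := by
  refine PySem.Dict.getD_of_mem_items _ ?_ ?_ _
  · exact List.mem_map_of_mem hu
  · rw [pv_keys_specA]; exact PySem.Set.nodup_ofList _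

lemma pv_contains_specA (ps : List (String × String)) (u : String) :
    (pvSpecA ps).contains u = true ↔ u ∈ PySem.Set.ofList (ps.map Prod.fst) := by
  rw [PySem.Dict.contains_iff_mem_keys, pv_keys_specA]

-- inner membership: v is a key of the inner dict at u iff (u,v) occurs in ps
lemma pv_mem_inner_keys {ps : List (String × String)} {u v : String} :
    v ∈ (PySem.Dict.mk (pvInner ps u)).keys ↔ (u, v) ∈ ps := by
  rw [PySem.Dict.keys_mk]
  unfold pvInner
  rw [List.map_map]
  constructor
  · intro h
    obtain ⟨k, hk, hkv⟩ := List.mem_map.mp h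
    have hk1 : k.1 = u := by simpa using (List.mem_filter.mp hk).2
    have hk2 : k.2 = v := by simpa using hkv
    have : k ∈ ps := (PySem.Set.mem_ofList _ _).mp (List.mem_filter.mp hk).1
    rwa [← hk1, ← hk2, Prod.mk.eta]
  · intro h
    refine List.mem_map.mpr ⟨(u, v), List.mem_filter.mpr ⟨(PySem.Set.mem_ofList _ _).mpr h, by simp⟩, rfl⟩

-- ===== the closed form of A's fold =====
lemma pv_A_items (ps : List (String × String)) :
    ps.foldl pvStep PySem.Dict.empty = pvSpecA ps := by
  induction ps using List.reverseRecOn with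
  | nil => rfl
  | append_singleton ps p ih =>
    obtain ⟨u, v⟩ := p
    rw [List.foldl_append, List.foldl_cons, List.foldl_nil, ih]
    -- abbreviations for the new spec's pieces
    have hF' : PySem.Set.ofList ((ps ++ [(u, v)]).map Prod.fst)
        = (PySem.Set.ofList (ps.map Prod.fst)).add u := by
      rw [List.map_append, List.map_cons, List.map_nil, PySem.Set.ofList_append_singleton]
    have hS' : PySem.Set.ofList (ps ++ [(u, v)]) = (PySem.Set.ofList ps).add (u, v) :=
      PySem.Set.ofList_append_singleton _ _
    by_cases hu : u ∈ PySem.Set.ofList (ps.map Prod.fst)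
    · -- u is already an outer key
      have hcont : (pvSpecA ps).contains u = true := (pv_contains_specA ps u).mpr hu
      rw [show pvStep (pvSpecA ps) (u, v)
            = (pvSpecA ps).insert u
                (((pvSpecA ps).getD u PySem.Dict.empty).insert v
                  (((pvSpecA ps).getD u PySem.Dict.empty).getD v 0 + 1)) from rfl,
        pv_getD_specA hu]
      apply PySem.Dict.ext
      rw [PySem.Dict.items_insert_of_contains _ _ hcont]
      show ((PySem.Set.ofList (ps.map Prod.fst)).map
          (fun u' => (u', PySem.Dict.mk (pvInner ps u')))).map _ = (pvSpecA (ps ++ [(u, v)])).items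
      rw [List.map_map]
      unfold pvSpecA
      rw [hF', PySem.Set.add_of_mem hu]
      refine List.map_congr_left (fun u' hu' => ?_)
      by_cases huu : u' = u
      · subst huu
        simp only [Function.comp, beq_self_eq_true, if_pos]
        refine Prod.ext rfl ?_
        apply PySem.Dict.ext
        by_cases hp : (u', v) ∈ ps
        · -- the pair was seen before: bump its count in place
          have hvmem : v ∈ (PySem.Dict.mk (pvInner ps u')).keys := pv_mem_inner_keys.mpr hp
          have hcv : (PySem.Dict.mk (pvInner ps u')).contains v = true :=
            (PySem.Dict.contains_iff_mem_keys _ _).mpr hvmem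
          have hgv : (PySem.Dict.mk (pvInner ps u')).getD v 0 = pvCnt ps (u', v) := by
            refine PySem.Dict.getD_of_mem_items _ ?_ (pv_nodup_inner_keys ps u') _
            show ((u', v).2, pvCnt ps (u', v)) ∈ pvInner ps u'
            exact List.mem_map_of_mem
              (List.mem_filter.mpr ⟨(PySem.Set.mem_ofList _ _).mpr hp, by simp⟩)
          rw [hgv, PySem.Dict.items_insert_of_contains _ _ hcv]
          unfold pvInner
          rw [hS', PySem.Set.add_of_mem ((PySem.Set.mem_ofList _ _).mpr hp), List.map_map]
          refine List.map_congr_left (fun k hk => ?_)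
          have hk1 : k.1 = u' := by simpa using (List.mem_filter.mp hk).2
          by_cases hkv : k.2 = v
          · have hkp : k = (u', v) := Prod.ext hk1 hkv
            subst hkp
            simp only [Function.comp, beq_self_eq_true, if_pos]
            refine Prod.ext rfl ?_
            unfold pvCnt
            rw [List.count_append]
            push_cast
            simp
          · have : (k.2 == v) = false := by simpa using hkv
            simp only [Function.comp, this, if_neg, Bool.false_eq_true, not_false_iff]
            refine Prod.ext rfl ?_
            unfold pvCnt
            rw [List.count_append]
            have : List.count k [(u', v)] = 0 := by
              simp [List.count_cons]
              intro h; exact absurd (congrArg Prod.snd h).symm hkv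
            rw [this]; push_cast; ring
        · -- new pair under an existing outer key: appended to the inner dict
          have hvmem : v ∉ (PySem.Dict.mk (pvInner ps u')).keys := fun h => hp (pv_mem_inner_keys.mp h)
          have hcv : (PySem.Dict.mk (pvInner ps u')).contains v = false := by
            rcases Bool.eq_false_or_eq_true ((PySem.Dict.mk (pvInner ps u')).contains v) with h | h
            · exact absurd ((PySem.Dict.contains_iff_mem_keys _ _).mp h) hvmem
            · exact h
          rw [PySem.Dict.getD_of_not_contains _ _ hcv,
            PySem.Dict.items_insert_of_not_contains _ _ hcv]
          unfold pvInner
          rw [hS', PySem.Set.add_of_not_mem (fun h => hp ((PySem.Set.mem_ofList _ _).mp h)),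
            List.filter_append, List.map_append]
          have hfilt : List.filter (fun k => k.1 == u') [(u', v)] = [(u', v)] := by simp
          rw [hfilt]
          congr 1
          · refine List.map_congr_left (fun k hk => ?_)
            refine Prod.ext rfl ?_
            unfold pvCnt
            have hkps : k ∈ ps := (PySem.Set.mem_ofList _ _).mp (List.mem_filter.mp hk).1
            have hkne : k ≠ (u', v) := fun h => hp (h ▸ hkps)
            rw [List.count_append]
            have : List.count k [(u', v)] = 0 := by
              simp [List.count_cons]
              intro h; exact absurd h.symm hkne
            rw [this]; push_cast; ring
          · simp only [List.map_cons, List.map_nil]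
            refine congrArg (· :: []) (Prod.ext rfl ?_)
            unfold pvCnt
            rw [List.count_append, List.count_eq_zero.mpr hp]
            simp
      · -- other outer keys are untouched
        have huu' : (u' == u) = false := by simpa using huu
        simp only [Function.comp, huu', if_neg, Bool.false_eq_true, not_false_iff]
        refine Prod.ext rfl ?_
        apply PySem.Dict.ext
        unfold pvInner
        by_cases hp : (u, v) ∈ PySem.Set.ofList ps
        · rw [hS', PySem.Set.add_of_mem hp]
          refine List.map_congr_left (fun k hk => ?_)
          refine Prod.ext rfl ?_
          unfold pvCnt
          have hk1 : k.1 = u' := by simpa using (List.mem_filter.mp hk).2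
          have hkne : k ≠ (u, v) := fun h => huu (by rw [← hk1, h])
          rw [List.count_append]
          have : List.count k [(u, v)] = 0 := by
            simp [List.count_cons]
            intro h; exact absurd h.symm hkne
          rw [this]; push_cast; ring
        · rw [hS', PySem.Set.add_of_not_mem hp, List.filter_append]
          have hfilt : List.filter (fun k => k.1 == u') [(u, v)] = [] := by
            simp; intro h; exact absurd h.symm huu
          rw [hfilt, List.append_nil]
          refine List.map_congr_left (fun k hk => ?_)
          refine Prod.ext rfl ?_
          unfold pvCnt
          have hkps : k ∈ ps := (PySem.Set.mem_ofList _ _).mp (List.mem_filter.mp hk).1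
          have hkne : k ≠ (u, v) := fun h => hp (h ▸ (PySem.Set.mem_ofList _ _).mpr hkps)
          rw [List.count_append]
          have : List.count k [(u, v)] = 0 := by
            simp [List.count_cons]
            intro h; exact absurd h.symm hkne
          rw [this]; push_cast; ring
    · -- u is a brand-new outer key: appended at the end
      have hpnot : (u, v) ∉ ps := fun h => hu (by
        rw [PySem.Set.mem_ofList]
        exact List.mem_map.mpr ⟨(u, v), h, rfl⟩)
      have hcont : (pvSpecA ps).contains u = false := by
        rcases Bool.eq_false_or_eq_true ((pvSpecA ps).contains u) with h | h
        · exact absurd ((pv_contains_specA ps u).mp h) hu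
        · exact h
      rw [show pvStep (pvSpecA ps) (u, v)
            = (pvSpecA ps).insert u
                (((pvSpecA ps).getD u PySem.Dict.empty).insert v
                  (((pvSpecA ps).getD u PySem.Dict.empty).getD v 0 + 1)) from rfl,
        PySem.Dict.getD_of_not_contains _ _ hcont, PySem.Dict.getD_empty]
      apply PySem.Dict.ext
      rw [PySem.Dict.items_insert_of_not_contains _ _ hcont]
      unfold pvSpecA
      rw [hF', PySem.Set.add_of_not_mem hu, List.map_append, List.map_cons, List.map_nil]
      congr 1
      · -- existing entries unchanged
        refine List.map_congr_left (fun u' hu' => ?_)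
        refine Prod.ext rfl ?_
        apply PySem.Dict.ext
        unfold pvInner
        have huu : u' ≠ u := fun h => hu (h ▸ hu')
        rw [hS', PySem.Set.add_of_not_mem (fun h => hpnot ((PySem.Set.mem_ofList _ _).mp h)),
          List.filter_append]
        have hfilt : List.filter (fun k => k.1 == u') [(u, v)] = [] := by
          simp; intro h; exact absurd h.symm huu
        rw [hfilt, List.append_nil]
        refine List.map_congr_left (fun k hk => ?_)
        refine Prod.ext rfl ?_
        unfold pvCnt
        have hkps : k ∈ ps := (PySem.Set.mem_ofList _ _).mp (List.mem_filter.mp hk).1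
        have hkne : k ≠ (u, v) := fun h => hpnot (h ▸ hkps)
        rw [List.count_append]
        have : List.count k [(u, v)] = 0 := by
          simp [List.count_cons]
          intro h; exact absurd h.symm hkne
        rw [this]; push_cast; ring
      · -- the new entry
        refine congrArg (· :: []) (Prod.ext rfl ?_)
        apply PySem.Dict.ext
        rw [PySem.Dict.items_insert_of_not_contains _ _ (PySem.Dict.contains_empty _)]
        unfold pvInner
        rw [hS', PySem.Set.add_of_not_mem (fun h => hpnot ((PySem.Set.mem_ofList _ _).mp h)),
          List.filter_append]
        have hfiltL : List.filter (fun k => k.1 == u) (PySem.Set.ofList ps) = [] := by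
          rw [List.filter_eq_nil_iff]
          intro k hk hku
          have hkps : k ∈ ps := (PySem.Set.mem_ofList _ _).mp hk
          have : k.1 = u := by simpa using hku
          exact hu ((PySem.Set.mem_ofList _ _).mpr (List.mem_map.mpr ⟨k, hkps, this⟩))
        have hfilt : List.filter (fun k => k.1 == u) [(u, v)] = [(u, v)] := by simp
        rw [hfiltL, hfilt, List.nil_append]
        show (PySem.Dict.empty.items : List (String × Int)) ++ [(v, 0 + 1)]
            = [((u, v).2, pvCnt (ps ++ [(u, v)]) (u, v))]
        have hemp : (PySem.Dict.empty : PySem.Dict String Int).items = [] := rfl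
        unfold pvCnt
        rw [hemp, List.count_append, List.count_eq_zero.mpr hpnot, List.nil_append]
        simp

-- ===== the closed form of B's reshape of the counter =====
lemma pv_reshape (L : List ((String × String) × Int)) (hnd : (L.map Prod.fst).Nodup) :
    L.foldl pvG PySem.Dict.empty
      = PySem.Dict.mk ((PySem.Set.ofList (L.map (fun pc => pc.1.1))).map
          (fun u => (u, PySem.Dict.mk ((L.filter (fun pc => pc.1.1 == u)).map
            (fun pc => (pc.1.2, pc.2)))))) := by
  induction L using List.reverseRecOn with
  | nil => rfl
  | append_singleton L p ih =>
    obtain ⟨⟨u, v⟩, c⟩ := p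
    have hnd' : (L.map Prod.fst).Nodup := by
      rw [List.map_append] at hnd
      exact hnd.of_append_left
    have hpnotin : (u, v) ∉ L.map Prod.fst := by
      rw [List.map_append] at hnd
      intro h
      exact List.disjoint_of_nodup_append hnd h (by simp)
    rw [List.foldl_append, List.foldl_cons, List.foldl_nil, ih hnd']
    have hkeys : (PySem.Dict.mk ((PySem.Set.ofList (L.map (fun pc => pc.1.1))).map
        (fun u => (u, PySem.Dict.mk ((L.filter (fun pc => pc.1.1 == u)).map
          (fun pc => (pc.1.2, pc.2))))))).keys = PySem.Set.ofList (L.map (fun pc => pc.1.1)) := by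
      rw [PySem.Dict.keys_mk, List.map_map]
      have h : ((fun (x : String × PySem.Dict String Int) => x.1)
          ∘ fun u => (u, PySem.Dict.mk ((L.filter (fun pc => pc.1.1 == u)).map
            (fun pc => (pc.1.2, pc.2))))) = id := rfl
      rw [h, List.map_id]
    have hF' : PySem.Set.ofList ((L ++ [((u, v), c)]).map (fun pc => pc.1.1))
        = (PySem.Set.ofList (L.map (fun pc => pc.1.1))).add u := by
      rw [List.map_append, List.map_cons, List.map_nil, PySem.Set.ofList_append_singleton]
    by_cases hu : u ∈ PySem.Set.ofList (L.map (fun pc => pc.1.1))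
    · -- existing outer key
      have hcont : (PySem.Dict.mk ((PySem.Set.ofList (L.map (fun pc => pc.1.1))).map
          (fun u => (u, PySem.Dict.mk ((L.filter (fun pc => pc.1.1 == u)).map
            (fun pc => (pc.1.2, pc.2))))))).contains u = true := by
        rw [PySem.Dict.contains_iff_mem_keys, hkeys]; exact hu
      have hgd : (PySem.Dict.mk ((PySem.Set.ofList (L.map (fun pc => pc.1.1))).map
          (fun u => (u, PySem.Dict.mk ((L.filter (fun pc => pc.1.1 == u)).map
            (fun pc => (pc.1.2, pc.2))))))).getD u PySem.Dict.empty
          = PySem.Dict.mk ((L.filter (fun pc => pc.1.1 == u)).map (fun pc => (pc.1.2, pc.2))) := by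
        refine PySem.Dict.getD_of_mem_items _ ?_ ?_ _
        · exact List.mem_map_of_mem hu
        · rw [hkeys]; exact PySem.Set.nodup_ofList _
      have hvnot : v ∉ (PySem.Dict.mk ((L.filter (fun pc => pc.1.1 == u)).map
          (fun pc => (pc.1.2, pc.2)))).keys := by
        rw [PySem.Dict.keys_mk, List.map_map]
        intro h
        obtain ⟨pc, hpc, hpcv⟩ := List.mem_map.mp h
        have h1 : pc.1.1 = u := by simpa using (List.mem_filter.mp hpc).2
        have h2 : pc.1.2 = v := by simpa using hpcv
        exact hpnotin (List.mem_map.mpr ⟨pc, (List.mem_filter.mp hpc).1,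
          by rw [← h1, ← h2, Prod.mk.eta]⟩)
      have hcv : (PySem.Dict.mk ((L.filter (fun pc => pc.1.1 == u)).map
          (fun pc => (pc.1.2, pc.2)))).contains v = false := by
        rcases Bool.eq_false_or_eq_true ((PySem.Dict.mk ((L.filter (fun pc => pc.1.1 == u)).map
          (fun pc => (pc.1.2, pc.2)))).contains v) with h | h
        · exact absurd ((PySem.Dict.contains_iff_mem_keys _ _).mp h) hvnot
        · exact h
      show (PySem.Dict.mk _).insert u _ = _
      apply PySem.Dict.ext
      rw [hgd, PySem.Dict.items_insert_of_contains _ _ hcont]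
      show (List.map _ ((PySem.Set.ofList (L.map (fun pc => pc.1.1))).map _)) = _
      rw [List.map_map, hF', PySem.Set.add_of_mem hu]
      refine List.map_congr_left (fun u' hu' => ?_)
      by_cases huu : u' = u
      · subst huu
        simp only [Function.comp, beq_self_eq_true, if_pos]
        refine Prod.ext rfl ?_
        apply PySem.Dict.ext
        rw [PySem.Dict.items_insert_of_not_contains _ _ hcv]
        rw [List.filter_append, List.map_append]
        have hone : List.filter (fun pc => pc.1.1 == u') [((u', v), c)] = [((u', v), c)] := by simp
        rw [hone]
        rfl
      · have huu' : (u' == u) = false := by simpa using huu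
        simp only [Function.comp, huu', if_neg, Bool.false_eq_true, not_false_iff]
        refine Prod.ext rfl (congrArg PySem.Dict.mk ?_)
        rw [List.filter_append]
        have : List.filter (fun pc => pc.1.1 == u') [((u, v), c)] = [] := by
          simp; intro h; exact absurd h.symm huu
        rw [this, List.append_nil]
    · -- brand-new outer key
      have hcont : (PySem.Dict.mk ((PySem.Set.ofList (L.map (fun pc => pc.1.1))).map
          (fun u => (u, PySem.Dict.mk ((L.filter (fun pc => pc.1.1 == u)).map
            (fun pc => (pc.1.2, pc.2))))))).contains u = false := by
        rcases Bool.eq_false_or_eq_true ((PySem.Dict.mk ((PySem.Set.ofList (L.map (fun pc => pc.1.1))).map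
          (fun u => (u, PySem.Dict.mk ((L.filter (fun pc => pc.1.1 == u)).map
            (fun pc => (pc.1.2, pc.2))))))).contains u) with h | h
        · exact absurd (hkeys ▸ (PySem.Dict.contains_iff_mem_keys _ _).mp h) hu
        · exact h
      show (PySem.Dict.mk _).insert u _ = _
      apply PySem.Dict.ext
      rw [PySem.Dict.getD_of_not_contains _ _ hcont,
        PySem.Dict.items_insert_of_not_contains _ _ hcont]
      show ((PySem.Set.ofList (L.map (fun pc => pc.1.1))).map _) ++ _ = _
      rw [hF', PySem.Set.add_of_not_mem hu, List.map_append, List.map_cons, List.map_nil]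
      congr 1
      · refine List.map_congr_left (fun u' hu' => ?_)
        refine Prod.ext rfl (congrArg PySem.Dict.mk ?_)
        have huu : u' ≠ u := fun h => hu (h ▸ hu')
        rw [List.filter_append]
        have : List.filter (fun pc => pc.1.1 == u') [((u, v), c)] = [] := by
          simp; intro h; exact absurd h.symm huu
        rw [this, List.append_nil]
      · refine congrArg (· :: []) (Prod.ext rfl (congrArg PySem.Dict.mk ?_))
        have hfiltL : List.filter (fun pc => pc.1.1 == u) L = [] := by
          rw [List.filter_eq_nil_iff]
          intro pc hpc hpcu
          have : pc.1.1 = u := by simpa using hpcu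
          exact hu ((PySem.Set.mem_ofList _ _).mpr (List.mem_map.mpr ⟨pc, hpc, this⟩))
        rw [List.filter_append, hfiltL, List.nil_append]
        have : List.filter (fun pc => pc.1.1 == u) [((u, v), c)] = [((u, v), c)] := by simp
        rw [this]
        show ((PySem.Dict.empty.insert v c).items : List (String × Int)) = [(v, c)]
        rw [PySem.Dict.items_insert_of_not_contains _ _ (PySem.Dict.contains_empty _)]
        rfl

-- ===== the reshaped counter equals A's incremental fold =====
lemma pv_main (ps : List (String × String)) :
    (PySem.Dict.counter ps).items.foldl pvG PySem.Dict.empty = ps.foldl pvStep PySem.Dict.empty := by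
  rw [PySem.Dict.items_counter, pv_A_items]
  have hnd : (((PySem.Set.ofList ps).map (fun k => (k, (List.count k ps : Int)))).map Prod.fst).Nodup := by
    rw [List.map_map]
    have hcomp : (Prod.fst ∘ fun k : String × String => (k, (List.count k ps : Int))) = id := rfl
    rw [hcomp, List.map_id]
    exact PySem.Set.nodup_ofList ps
  rw [pv_reshape _ hnd]
  unfold pvSpecA
  apply PySem.Dict.ext
  dsimp only
  rw [List.map_map]
  have hc1 : ((fun (pc : (String × String) × Int) => pc.1.1)
      ∘ fun k : String × String => (k, (List.count k ps : Int))) = Prod.fst := rfl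
  rw [hc1, pv_ofList_map_ofList]
  refine List.map_congr_left (fun u hu => ?_)
  refine Prod.ext rfl (congrArg PySem.Dict.mk ?_)
  rw [List.filter_map, List.map_map]
  rfl

-- ===== assembling the two ports =====
lemma pv_A_fold (inp : List (List (List String))) (hpre : Pre_uv_counts inp) :
    uv_counts inp
      = ((pvAll inp).foldl pvStep PySem.Dict.empty).items.map (fun p => (p.1, p.2.items)) := by
  have hdict :
      List.foldl (fun q i =>
        List.foldl (fun q j =>
            pvBody q
              (PySem.List.pyGetD (PySem.List.pyGetD (PySem.List.pyGetD (inp.map pvPad) i []) 1 []) (j - 2) "")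
              (PySem.List.pyGetD (PySem.List.pyGetD (PySem.List.pyGetD (inp.map pvPad) i []) 1 []) (j - 1) ""))
          q
          (PySem.List.pyRange 2 (((PySem.List.pyGetD (PySem.List.pyGetD (inp.map pvPad) i []) 1 []).length : Int)) 1))
        PySem.Dict.empty
        (PySem.List.pyRange 0 (((inp.map pvPad).length : Int)) 1)
      = (pvAll inp).foldl pvStep PySem.Dict.empty := by
    have h1 := PySem.List.foldl_pyRange_zero_pyGetD' (inp.map pvPad) ([] : List (List String))
      (fun q sentence =>
        List.foldl (fun q j =>
            pvBody q (PySem.List.pyGetD (PySem.List.pyGetD sentence 1 []) (j - 2) "")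
                     (PySem.List.pyGetD (PySem.List.pyGetD sentence 1 []) (j - 1) ""))
          q (PySem.List.pyRange 2 (((PySem.List.pyGetD sentence 1 []).length : Int)) 1))
      PySem.Dict.empty
    refine Eq.trans h1 ?_
    rw [List.foldl_map]
    have hb : (fun (st : PySem.Dict String (PySem.Dict String Int)) (pr : String × String) =>
        pvBody st pr.1 pr.2) = pvStep :=
      funext fun st => funext fun pr =>
        (pv_body_eq st pr.1 pr.2).trans (congrArg (pvStep st) (Prod.mk.eta))
    refine Eq.trans (PySem.List.foldl_congr_mem inp
      (fun q s =>
        List.foldl (fun q j =>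
            pvBody q (PySem.List.pyGetD (PySem.List.pyGetD (pvPad s) 1 []) (j - 2) "")
                     (PySem.List.pyGetD (PySem.List.pyGetD (pvPad s) 1 []) (j - 1) ""))
          q (PySem.List.pyRange 2 (((PySem.List.pyGetD (pvPad s) 1 []).length : Int)) 1))
      (fun acc s => (pvPairs (PySem.List.pyGetD s 1 [])).foldl pvStep acc)
      PySem.Dict.empty (fun acc s hs => ?_)) ?_
    · beta_reduce
      have hlen : 2 ≤ s.length := hpre s hs
      have h1lt : 1 < s.length := by omega
      have htags : PySem.List.pyGetD (pvPad s) 1 []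
          = ("<START>" :: ("<START>" :: PySem.List.pyGetD s 1 [])) ++ ["<STOP>"] := by
        rw [pvPad, PySem.List.pyGetD_ofNat', List.getD_eq_getElem?_getD, List.getElem?_set]
        simp [h1lt]
      rw [htags]
      exact (pv_inner_loop (PySem.List.pyGetD s 1 []) pvBody acc).trans (by rw [hb])
    · rw [pvAll, List.foldl_flatMap]
  exact congrArg
    (fun d : PySem.Dict String (PySem.Dict String Int) => d.items.map (fun p => (p.1, p.2.items)))
    hdict

lemma pv_B_fold (inp : List (List (List String))) :
    uv_counts_alt inp
      = ((PySem.Dict.counter (pvAll inp)).items.foldl pvG PySem.Dict.empty).items.map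
          (fun p => (p.1, p.2.items)) := by
  have hz : ∀ t : List String,
      ((["<START>", "<START>"] : List String) ++ t).zip
        (PySem.List.slice ((["<START>", "<START>"] : List String) ++ t) (some 1) none) = pvPairs t := by
    intro t
    rw [PySem.List.slice_from_one]
    rfl
  have hpairs : inp.foldl (fun pairs sentence =>
        pairs ++ ((["<START>", "<START>"] : List String) ++ PySem.List.pyGetD sentence 1 []).zip
          (PySem.List.slice ((["<START>", "<START>"] : List String) ++ PySem.List.pyGetD sentence 1 [])
            (some 1) none)) [] = pvAll inp := by
    refine Eq.trans (PySem.List.foldl_congr_mem inp _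
      (fun acc s => acc ++ pvPairs (PySem.List.pyGetD s 1 [])) []
      (fun acc s _ => by rw [hz])) ?_
    rw [PySem.List.foldl_append_eq_flatMap]
    rfl
  have hb2 : (fun (q : PySem.Dict String (PySem.Dict String Int)) (pc : (String × String) × Int) =>
      (q.setdefault pc.1.1 PySem.Dict.empty).insert pc.1.1
        (((q.setdefault pc.1.1 PySem.Dict.empty).getD pc.1.1 PySem.Dict.empty).insert pc.1.2 pc.2))
      = pvG := funext fun q => funext fun pc => pv_netB q pc
  have hdict :
      ((inp.foldl (fun pairs sentence =>
          pairs ++ ((["<START>", "<START>"] : List String) ++ PySem.List.pyGetD sentence 1 []).zip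
            (PySem.List.slice ((["<START>", "<START>"] : List String) ++ PySem.List.pyGetD sentence 1 [])
              (some 1) none)) []).foldl
        (fun counts p => counts.insert p (counts.getD p 0 + 1)) PySem.Dict.empty).items.foldl
          (fun q pc => (q.setdefault pc.1.1 PySem.Dict.empty).insert pc.1.1
            (((q.setdefault pc.1.1 PySem.Dict.empty).getD pc.1.1 PySem.Dict.empty).insert pc.1.2 pc.2))
          PySem.Dict.empty
      = (PySem.Dict.counter (pvAll inp)).items.foldl pvG PySem.Dict.empty := by
    rw [hpairs, PySem.Dict.foldl_insert_getD_add_one_eq_counter, hb2]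
  exact congrArg
    (fun d : PySem.Dict String (PySem.Dict String Int) => d.items.map (fun p => (p.1, p.2.items)))
    hdict

-- ===== VERDICT (by name: the statement is the Claim_ definition above) =====
theorem uv_counts_spec : Claim_equal_uv_counts := by
  intro inp hdom hpre
  unfold Spec_uv_counts
  rw [pv_A_fold inp hpre, pv_B_fold inp, pv_main]
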